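-- pv_equiv track=rewrite | github.com/DogForMoon/pythontasks | 12.01.2020/Basic Math.py | calculate
-- ===== SOURCE A (Python) =====
-- def calculate(s):
--     exps = list(s)
--     reply = 0
--     temp = ''
--     for exp in exps:
--         if exp == 'p':
--             reply += int(temp)
--             temp = ''
--         elif exp == 'm':
--             reply += int(temp)
--             temp = ''
--             temp += '-'
--         elif exp.isdigit():
--             temp += exp
--     reply += int(temp)
--     return str(reply)
-- ===== SOURCE B (Python) =====
-- def calculate(s):
--     segs = []
--     marks = []
--     cur = ''
--     for c in s:
--         if c == 'p' or c == 'm':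
--             segs.append(cur)
--             marks.append(c)
--             cur = ''
--         elif c.isdigit():
--             cur += c
--     segs.append(cur)
--     reply = int(segs[0])
--     for mark, seg in zip(marks, segs[1:]):
--         if mark == 'p':
--             reply += int(seg)
--         else:
--             reply -= int(seg)
--     return str(reply)
-- ===== Notes on version B (the rewrite author's own statement) =====
-- stated objective: alternative
-- what changed: B tokenizes first (one scan building the digit-segment list and the 'p'/'m' marker list) and then folds the zipped (marker, segment) pairs into a signed sum, instead of A's single interleaved loop that keeps a running total and smuggles the sign into the accumulator as a '-' string prefix.
import Mathlib
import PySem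

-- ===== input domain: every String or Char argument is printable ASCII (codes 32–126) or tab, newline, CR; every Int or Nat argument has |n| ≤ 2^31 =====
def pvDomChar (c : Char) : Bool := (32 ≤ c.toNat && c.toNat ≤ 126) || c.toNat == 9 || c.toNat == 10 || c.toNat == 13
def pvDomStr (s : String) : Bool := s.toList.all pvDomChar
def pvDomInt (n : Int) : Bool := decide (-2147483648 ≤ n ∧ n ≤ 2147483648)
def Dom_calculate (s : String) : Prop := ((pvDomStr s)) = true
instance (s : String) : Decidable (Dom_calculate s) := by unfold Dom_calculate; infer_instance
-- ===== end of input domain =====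

-- B re-implements A by tokenizing first (segment/marker lists) and then zip-folding signed
-- terms, instead of A's interleaved running sum with a '-'-prefixed accumulator; same cost.

-- ===== PORT A =====
-- A's loop body; state none = a ValueError has been raised (excluded by Pre_calculate)
def calcA_step (st : Option (Int × List Char)) (c : Char) : Option (Int × List Char) :=
  match st with
  | none => none
  | some (reply, temp) =>
    if c = 'p' then
      match PySem.Int.ofChars? temp with
      | none => none
      | some v => some (reply + v, [])
    else if c = 'm' then
      match PySem.Int.ofChars? temp with
      | none => none
      | some v => some (reply + v, ['-'])
    else if PySem.Chars.strIsdigit [c] then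
      some (reply, temp ++ [c])
    else st

def calculate (s : String) : String :=
  match s.toList.foldl calcA_step (some (0, [])) with
  | none => ""        -- ValueError: unreachable under Pre_calculate
  | some (reply, temp) =>
    match PySem.Int.ofChars? temp with
    | none => ""      -- ValueError: unreachable under Pre_calculate
    | some v => PySem.Int.toStr (reply + v)

-- ===== PORT B =====
-- first pass of Source B: build the digit segments and the 'p'/'m' markers
def calcB_step (st : List (List Char) × List Char × List Char) (c : Char) :
    List (List Char) × List Char × List Char :=
  if c = 'p' ∨ c = 'm' then (st.1 ++ [st.2.2], st.2.1 ++ [c], [])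
  else if PySem.Chars.strIsdigit [c] then (st.1, st.2.1, st.2.2 ++ [c])
  else st

def calcB_scan (l : List Char) : List (List Char) × List Char × List Char :=
  l.foldl calcB_step ([], [], [])

-- second pass of Source B: fold the (marker, segment) pairs; none = ValueError
def calcB_sum (acc : Option Int) (pr : Char × List Char) : Option Int :=
  match acc, PySem.Int.ofChars? pr.2 with
  | some r, some v => some (if pr.1 = 'p' then r + v else r - v)
  | _, _ => none

def calculate_alt (s : String) : String :=
  match ((calcB_scan s.toList).2.1.zip
        ((calcB_scan s.toList).1 ++ [(calcB_scan s.toList).2.2]).tail).foldl calcB_sum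
      (PySem.Int.ofChars? (((calcB_scan s.toList).1 ++ [(calcB_scan s.toList).2.2]).headD [])) with
  | none => ""      -- ValueError: unreachable under Pre_calculate
  | some r => PySem.Int.toStr r

-- ===== PRECONDITION & SPEC =====
-- Pre_ excludes exactly the inputs where A raises ValueError (int('') / int('-')): keeping only
-- the digit and 'p'/'m' characters, the string must start and end with a digit and have no two
-- adjacent markers, i.e. every segment between markers contains at least one digit.
def Pre_calculate (s : String) : Prop :=
  ((s.toList.filter (fun c => PySem.Chars.isdigit c || c = 'p' || c = 'm')).headD 'p' ∈
      (['0','1','2','3','4','5','6','7','8','9'] : List Char)) ∧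
  ((s.toList.filter (fun c => PySem.Chars.isdigit c || c = 'p' || c = 'm')).getLastD 'p' ∈
      (['0','1','2','3','4','5','6','7','8','9'] : List Char)) ∧
  (((s.toList.filter (fun c => PySem.Chars.isdigit c || c = 'p' || c = 'm')).zip
      (s.toList.filter (fun c => PySem.Chars.isdigit c || c = 'p' || c = 'm')).tail).all
      (fun pr => PySem.Chars.isdigit pr.1 || PySem.Chars.isdigit pr.2)) = true
instance (s : String) : Decidable (Pre_calculate s) := by unfold Pre_calculate; infer_instance

def pvWitness_calculate : String := "1p23m4"

def Spec_calculate (s : String) (out : String) : Prop := out = calculate_alt s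
instance (s : String) (out : String) : Decidable (Spec_calculate s out) := by unfold Spec_calculate; infer_instance

-- ===== CLAIM (what is proved, stated in full; the proofs are below) =====
def Claim_equal_calculate : Prop := ∀ (s : String), Dom_calculate s → Pre_calculate s → Spec_calculate s (calculate s)

-- ===== LEMMAS AND PROOFS =====

lemma dropWhile_self {p : Char → Bool} {l : List Char} (h : ∀ c ∈ l, p c = false) :
    l.dropWhile p = l := by
  cases l with
  | nil => rfl
  | cons a t => rw [List.dropWhile_cons_of_neg]; simp [h a (by simp)]

lemma strip_self {l : List Char} (h : ∀ c ∈ l, PySem.Int.isIntSpace c = false) :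
    (List.dropWhile PySem.Int.isIntSpace (List.dropWhile PySem.Int.isIntSpace l).reverse).reverse = l := by
  rw [dropWhile_self h, dropWhile_self (by simpa using h), List.reverse_reverse]

lemma digit_not_space {c : Char} (h : PySem.Chars.isdigit c = true) : PySem.Int.isIntSpace c = false := by
  simp only [PySem.Chars.isdigit, Bool.and_eq_true, decide_eq_true_eq] at h
  simp only [PySem.Int.isIntSpace]
  simp only [Bool.or_eq_false_iff, decide_eq_false_iff_not]
  refine ⟨⟨⟨⟨⟨?_,?_⟩,?_⟩,?_⟩,?_⟩,?_⟩ <;> rintro rfl <;> simp_all [Char.le_def]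

-- int('-' + d) = -int(d) for a digit-only d (both ValueError when d is empty)
lemma ofChars_neg (d : List Char) (hd : ∀ x ∈ d, PySem.Chars.isdigit x = true) :
    PySem.Int.ofChars? ('-' :: d) = (PySem.Int.ofChars? d).map (fun v => -v) := by
  have hns : ∀ c ∈ d, PySem.Int.isIntSpace c = false := fun c hc => digit_not_space (hd c hc)
  have hns' : ∀ c ∈ ('-' :: d), PySem.Int.isIntSpace c = false := by
    intro c hc
    rcases List.mem_cons.mp hc with rfl | hc
    · decide
    · exact hns _ hc
  simp only [PySem.Int.ofChars?]
  rw [strip_self hns', strip_self hns]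
  cases d with
  | nil => simp
  | cons a t =>
    have ha := hd a (by simp)
    have hane : a ≠ '-' ∧ a ≠ '+' := by
      simp only [PySem.Chars.isdigit, Bool.and_eq_true, decide_eq_true_eq] at ha
      constructor <;> rintro rfl <;> simp_all [Char.le_def]
    split
    · next ds hds =>
        obtain rfl : ds = a :: t := by injection hds with h1 h2; exact h2.symm
        split
        · next h' => exact absurd (by injection h') hane.1
        · next h' => exact absurd (by injection h') hane.2
        · simp
    · next ds hds => exact absurd hds (by simp)
    · next h1 _ => exact (h1 (a :: t) rfl).elim

lemma strIsdigit_singleton (c : Char) : PySem.Chars.strIsdigit [c] = PySem.Chars.isdigit c := by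
  simp [PySem.Chars.strIsdigit]

-- the sign A's temp carries into the next int(): '-' iff the last marker was 'm'
def prefixOf (marks : List Char) : List Char := if marks.getLastD ' ' = 'm' then ['-'] else []

-- A's running reply, expressed through B's data: the completed pairs (all markers but the
-- pending last one, zipped with the completed segments)
def replyOf (segs : List (List Char)) (marks : List Char) : Option Int :=
  match segs with
  | [] => some 0
  | t0 :: rest => (marks.zip rest).foldl calcB_sum (PySem.Int.ofChars? t0)

lemma zip_snoc {α β : Type} (ms : List α) (rest : List β) (y : β) (d : α)
    (h : ms.length = rest.length + 1) :
    ms.zip (rest ++ [y]) = ms.zip rest ++ [(ms.getLastD d, y)] := by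
  induction rest generalizing ms d with
  | nil =>
    match ms, h with
    | [m], _ => rfl
  | cons r rt ih =>
    match ms, h with
    | m :: mt, h =>
      have hlen : mt.length = rt.length + 1 := by simpa using h
      simp only [List.cons_append, List.zip_cons_cons, ih mt m hlen]
      cases mt with
      | nil => simp at hlen
      | cons x xs => simp only [List.getLastD_cons]

lemma getLastD_mem {marks : List Char} (h : marks ≠ []) (d : Char) : marks.getLastD d ∈ marks := by
  rw [List.getLastD_eq_getLast?]
  cases hm : marks.getLast? with
  | none => exact absurd (List.getLast?_eq_none_iff.mp hm) h
  | some x => simpa using List.mem_of_getLast? hm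

lemma calcB_sum_eq_bind (mk : Char) (hmk : mk = 'p' ∨ mk = 'm') (acc : Option Int)
    (cur : List Char) (hd : ∀ x ∈ cur, PySem.Chars.isdigit x = true) :
    calcB_sum acc (mk, cur) =
      acc.bind (fun r => (PySem.Int.ofChars?
        ((if mk = 'm' then ['-'] else []) ++ cur)).map (fun v => r + v)) := by
  rcases hmk with rfl | rfl
  · cases acc <;> cases h : PySem.Int.ofChars? cur <;> simp [calcB_sum, h]
  · rw [if_pos rfl, List.singleton_append, ofChars_neg cur hd]
    cases acc <;> cases h : PySem.Int.ofChars? cur <;> simp [calcB_sum, h, sub_eq_add_neg]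

lemma replyOf_snoc (segs : List (List Char)) (marks : List Char) (cur : List Char) (c : Char)
    (h : segs.length = marks.length) (hm : ∀ m ∈ marks, m = 'p' ∨ m = 'm')
    (hd : ∀ x ∈ cur, PySem.Chars.isdigit x = true) :
    replyOf (segs ++ [cur]) (marks ++ [c]) =
      (replyOf segs marks).bind
        (fun r => (PySem.Int.ofChars? (prefixOf marks ++ cur)).map (fun v => r + v)) := by
  cases segs with
  | nil =>
    have hmk : marks = [] := by cases marks <;> simp_all
    subst hmk
    simp only [replyOf, prefixOf, List.nil_append]
    cases h' : PySem.Int.ofChars? cur <;> simp [h', List.zip_nil_right]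
  | cons t0 rest =>
    have hlen : marks.length = rest.length + 1 := by simpa using h.symm
    have hne : marks ≠ [] := by cases marks <;> simp_all
    simp only [replyOf, List.cons_append]
    have htr : (marks ++ [c]).zip (rest ++ [cur]) = marks.zip (rest ++ [cur]) := by
      have := List.zip_append (l₁ := marks) (r₁ := [c]) (l₂ := rest ++ [cur])
        (r₂ := ([] : List (List Char))) (by simp [hlen])
      simpa using this
    rw [htr, zip_snoc marks rest cur ' ' hlen, List.foldl_append]
    simp only [List.foldl_cons, List.foldl_nil]
    rw [calcB_sum_eq_bind (marks.getLastD ' ') (hm _ (getLastD_mem hne ' ')) _ cur hd]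
    rfl

lemma scan_inv (l : List Char) :
    (calcB_scan l).1.length = (calcB_scan l).2.1.length ∧
    (∀ m ∈ (calcB_scan l).2.1, m = 'p' ∨ m = 'm') ∧
    (∀ x ∈ (calcB_scan l).2.2, PySem.Chars.isdigit x = true) ∧
    l.foldl calcA_step (some ((0 : Int), ([] : List Char))) =
      (replyOf (calcB_scan l).1 (calcB_scan l).2.1).map
        (fun r => (r, prefixOf (calcB_scan l).2.1 ++ (calcB_scan l).2.2)) := by
  induction l using List.reverseRecOn with
  | nil => simp [calcB_scan, replyOf, prefixOf]
  | append_singleton l c ih =>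
    obtain ⟨ihlen, ihm, ihd, ihA⟩ := ih
    have hB : calcB_scan (l ++ [c]) = calcB_step (calcB_scan l) c := by
      simp [calcB_scan, List.foldl_append]
    have hA : (l ++ [c]).foldl calcA_step (some ((0 : Int), ([] : List Char))) =
        calcA_step (l.foldl calcA_step (some ((0 : Int), ([] : List Char)))) c := by
      simp [List.foldl_append]
    by_cases hc : c = 'p' ∨ c = 'm'
    · have hBstep : calcB_scan (l ++ [c]) =
          ((calcB_scan l).1 ++ [(calcB_scan l).2.2], (calcB_scan l).2.1 ++ [c], []) := by
        rw [hB]; simp [calcB_step, hc]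
      rw [hBstep]
      refine ⟨by simpa using ihlen, ?_, by simp, ?_⟩
      · intro m hm
        rcases List.mem_append.mp hm with hm | hm
        · exact ihm m hm
        · simp at hm; subst hm; exact hc
      · rw [hA, ihA,
          replyOf_snoc (calcB_scan l).1 (calcB_scan l).2.1 (calcB_scan l).2.2 c ihlen ihm ihd]
        have hpre : prefixOf ((calcB_scan l).2.1 ++ [c]) = if c = 'm' then ['-'] else [] := by
          simp [prefixOf]
        rw [hpre]
        cases hro : replyOf (calcB_scan l).1 (calcB_scan l).2.1 with
        | none => simp [calcA_step]
        | some r =>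
          cases hof : PySem.Int.ofChars? (prefixOf (calcB_scan l).2.1 ++ (calcB_scan l).2.2) with
          | none =>
            rcases hc with rfl | rfl <;> simp [calcA_step, hof]
          | some v =>
            rcases hc with rfl | rfl <;> simp [calcA_step, hof]
    · rw [not_or] at hc
      by_cases hdg : PySem.Chars.isdigit c = true
      · have hBstep : calcB_scan (l ++ [c]) =
            ((calcB_scan l).1, (calcB_scan l).2.1, (calcB_scan l).2.2 ++ [c]) := by
          rw [hB]; simp [calcB_step, hc.1, hc.2, strIsdigit_singleton, hdg]
        rw [hBstep]
        refine ⟨ihlen, ihm, ?_, ?_⟩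
        · intro x hx
          rcases List.mem_append.mp hx with hx | hx
          · exact ihd x hx
          · simp at hx; subst hx; exact hdg
        · rw [hA, ihA]
          cases hro : replyOf (calcB_scan l).1 (calcB_scan l).2.1 with
          | none => simp [calcA_step]
          | some r =>
            simp [calcA_step, hc.1, hc.2, strIsdigit_singleton, hdg, List.append_assoc]
      · have hBstep : calcB_scan (l ++ [c]) = calcB_scan l := by
          rw [hB]; simp [calcB_step, hc.1, hc.2, strIsdigit_singleton, hdg]
        rw [hBstep]
        refine ⟨ihlen, ihm, ihd, ?_⟩
        rw [hA, ihA]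
        cases hro : replyOf (calcB_scan l).1 (calcB_scan l).2.1 with
        | none => simp [calcA_step]
        | some r => simp [calcA_step, hc.1, hc.2, strIsdigit_singleton, hdg]

-- A = B on every input (the '' default of the none branches included); Pre_ is only needed
-- to keep the ports aligned with the raising Python programs
lemma calc_eq (s : String) : calculate s = calculate_alt s := by
  obtain ⟨hlen, hm, hd, hA⟩ := scan_inv s.toList
  unfold calculate calculate_alt
  rw [hA]
  cases hsegs : (calcB_scan s.toList).1 with
  | nil =>
    have hmk : (calcB_scan s.toList).2.1 = [] := by
      have := hlen; rw [hsegs] at this; cases h' : (calcB_scan s.toList).2.1 <;> simp_all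
    rw [hmk]
    simp only [replyOf, prefixOf, List.nil_append, List.zip_nil_left]
    cases h' : PySem.Int.ofChars? (calcB_scan s.toList).2.2 with
    | none => simp [h', List.getLastD]
    | some v => simp [h', List.getLastD]
  | cons t0 rest =>
    have hlen' : (calcB_scan s.toList).2.1.length = rest.length + 1 := by
      rw [hsegs] at hlen; simpa using hlen.symm
    have hne : (calcB_scan s.toList).2.1 ≠ [] := by
      cases h' : (calcB_scan s.toList).2.1 <;> simp_all
    have htail : ((t0 :: rest) ++ [(calcB_scan s.toList).2.2]).tail =
        rest ++ [(calcB_scan s.toList).2.2] := by simp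
    rw [htail]
    rw [zip_snoc _ rest (calcB_scan s.toList).2.2 ' ' hlen', List.foldl_append]
    simp only [List.foldl_cons, List.foldl_nil, List.cons_append, List.headD_cons]
    rw [calcB_sum_eq_bind ((calcB_scan s.toList).2.1.getLastD ' ')
      (hm _ (getLastD_mem hne ' ')) _ _ hd]
    have hwr : (if (calcB_scan s.toList).2.1.getLastD ' ' = 'm' then ['-'] else []) =
        prefixOf (calcB_scan s.toList).2.1 := rfl
    rw [hwr]
    cases hro : replyOf (t0 :: rest) (calcB_scan s.toList).2.1 with
    | none =>
      have : ((calcB_scan s.toList).2.1.zip rest).foldl calcB_sum (PySem.Int.ofChars? t0) = none := by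
        simpa [replyOf] using hro
      simp [this]
    | some r =>
      have hfold : ((calcB_scan s.toList).2.1.zip rest).foldl calcB_sum (PySem.Int.ofChars? t0) = some r := by
        simpa [replyOf] using hro
      rw [hfold]
      cases hof : PySem.Int.ofChars?
          (prefixOf (calcB_scan s.toList).2.1 ++ (calcB_scan s.toList).2.2) with
      | none => simp [hof]
      | some v => simp [hof]

-- ===== VERDICT (by name: the statement is the Claim_ definition above) =====
theorem calculate_spec : Claim_equal_calculate := by
  intro s _ _
  unfold Spec_calculate
  exact calc_eq s
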